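-- pv_equiv track=rewrite | github.com/YassBchlh/L3V1 | back/segmentation/SegmentationYT.py | split_long_segment
-- ===== SOURCE A (Python) =====
-- from typing import List, Dict, Any
--
-- class YoutubeSegmentationError(Exception):
--     """
--     Exception levée lorsqu'une erreur survient pendant la segmentation d'un contenu YouTube.
--     """
--     pass
--
-- def split_long_segment(segment: str, max_length: int = 1500, overlap: int = 250) -> List[str]:
--     """
--     Découpe un segment trop long avec overlap.
--     """
--     if max_length <= 0:
--         raise YoutubeSegmentationError("max_length doit être strictement positif.")
--     if overlap < 0:
--         raise YoutubeSegmentationError("overlap doit être positif ou nul.")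
--     if overlap >= max_length:
--         raise YoutubeSegmentationError("overlap doit être strictement inférieur à max_length.")
--
--     if len(segment) <= max_length:
--         return [segment.strip()]
--
--     chunks: List[str] = []
--     start = 0
--     step = max_length - overlap
--
--     while start < len(segment):
--         end = min(start + max_length, len(segment))
--
--         if end < len(segment):
--             last_break = max(
--                 segment.rfind("\n\n", start, end),
--                 segment.rfind(". ", start, end),
--                 segment.rfind("! ", start, end),
--                 segment.rfind("? ", start, end),
--                 segment.rfind("; ", start, end),
--                 segment.rfind(": ", start, end),
--             )
--             if last_break > start + max_length // 2:
--                 end = last_break + 1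
--
--         chunk = segment[start:end].strip()
--         if chunk:
--             chunks.append(chunk)
--
--         start += step
--
--     return chunks
-- ===== SOURCE B (Python) =====
-- from bisect import bisect_right
-- from typing import List
--
--
-- class YoutubeSegmentationError(Exception):
--     pass
--
--
-- _BREAKS = ("\n\n", ". ", "! ", "? ", "; ", ": ")
--
--
-- def split_long_segment(segment: str, max_length: int = 1500, overlap: int = 250) -> List[str]:
--     if max_length <= 0:
--         raise YoutubeSegmentationError("max_length doit être strictement positif.")
--     if overlap < 0:
--         raise YoutubeSegmentationError("overlap doit être positif ou nul.")
--     if overlap >= max_length: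
--         raise YoutubeSegmentationError("overlap doit être strictement inférieur à max_length.")
--
--     n = len(segment)
--     if n <= max_length:
--         return [segment.strip()]
--
--     # staged passes: (1) one linear pass collecting every sentence-break position,
--     # (2) the list of chunk starts as an arithmetic range, (3) map each start to its
--     # chunk via a bisect lookup, (4) drop empty chunks.
--     positions = [i for i in range(n - 1) if segment[i:i + 2] in _BREAKS]
--
--     def chunk_at(start: int) -> str:
--         end = min(start + max_length, n)
--         if end < n:
--             j = bisect_right(positions, end - 2)
--             last_break = positions[j - 1] if j else -1
--             if last_break > start + max_length // 2:
--                 end = last_break + 1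
--         return segment[start:end].strip()
--
--     return [c for c in map(chunk_at, range(0, n, max_length - overlap)) if c]
-- ===== Notes on version B (the rewrite author's own statement) =====
-- stated objective: alternative
-- what changed: B is a staged pipeline instead of an accumulator while-loop: one linear pass builds a sorted list of all sentence-break positions, the chunk starts become an arithmetic range, each start is mapped to its chunk with a single bisect lookup replacing the six windowed rfind scans, and empty chunks are filtered at the end.
import Mathlib
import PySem

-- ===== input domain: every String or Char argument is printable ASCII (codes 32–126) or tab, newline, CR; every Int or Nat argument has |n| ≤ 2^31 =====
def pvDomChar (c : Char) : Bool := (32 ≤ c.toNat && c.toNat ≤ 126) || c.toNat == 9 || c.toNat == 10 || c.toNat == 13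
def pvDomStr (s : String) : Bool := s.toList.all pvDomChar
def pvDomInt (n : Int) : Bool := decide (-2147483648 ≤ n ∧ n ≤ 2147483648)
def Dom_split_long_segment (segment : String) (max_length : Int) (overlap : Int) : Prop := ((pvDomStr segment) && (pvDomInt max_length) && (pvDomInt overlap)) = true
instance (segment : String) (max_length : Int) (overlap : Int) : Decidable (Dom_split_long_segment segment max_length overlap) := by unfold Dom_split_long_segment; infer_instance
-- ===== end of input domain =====

-- B replaces A's accumulator while-loop (six windowed rfind scans per chunk) by a staged
-- pipeline: precomputed sorted break positions, an arithmetic range of chunk starts,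
-- a map with a bisect lookup per start, and a final filter of empty chunks (objective: alternative).

-- ===== PORT A =====
-- the while loop; fuel = len(segment) suffices because start grows by step ≥ 1 each turn (under Pre_)
def splitLoopA (segment : String) (max_length : Int) (overlap : Int) : Nat → Int → List String → List String
  | 0, _, chunks => chunks
  | fuel+1, start, chunks =>
    let n : Int := PySem.Str.len segment
    if start < n then
      let end0 := min (start + max_length) n
      let end_ := if end0 < n then
          let last_break := max (max (max (max (max
            (PySem.Str.rfindFrom segment "\n\n" start (some end0))
            (PySem.Str.rfindFrom segment ". " start (some end0)))
            (PySem.Str.rfindFrom segment "! " start (some end0)))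
            (PySem.Str.rfindFrom segment "? " start (some end0)))
            (PySem.Str.rfindFrom segment "; " start (some end0)))
            (PySem.Str.rfindFrom segment ": " start (some end0))
          if last_break > start + PySem.Int.floordiv max_length 2 then last_break + 1 else end0
        else end0
      let chunk := PySem.Str.strip (PySem.Str.slice segment (some start) (some end_))
      splitLoopA segment max_length overlap fuel (start + (max_length - overlap))
        (if chunk ≠ "" then chunks ++ [chunk] else chunks)
    else chunks

def split_long_segment (segment : String) (max_length : Int) (overlap : Int) : List String :=
  if max_length ≤ 0 then []        -- Python raises YoutubeSegmentationError (outside Pre_)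
  else if overlap < 0 then []      -- raises (outside Pre_)
  else if max_length ≤ overlap then []   -- raises (outside Pre_)
  else if PySem.Str.len segment ≤ max_length then [PySem.Str.strip segment]
  else splitLoopA segment max_length overlap segment.toList.length 0 []

-- ===== PORT B =====
def ytBreaks : List String := ["\n\n", ". ", "! ", "? ", "; ", ": "]

-- Source B's chunk_at: the chunk for one start, via a bisect lookup in the break positions
def ytChunkAt (segment : String) (max_length : Int) (positions : List Int) (start : Int) : String :=
  let n : Int := PySem.Str.len segment
  let end0 := min (start + max_length) n
  let end_ := if end0 < n then
      let j := PySem.List.bisectRight positions (end0 - 2)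
      let last_break := if j ≠ 0 then positions.getD (j-1) (-1) else (-1 : Int)
      if last_break > start + PySem.Int.floordiv max_length 2 then last_break + 1 else end0
    else end0
  PySem.Str.strip (PySem.Str.slice segment (some start) (some end_))

def split_long_segment_alt (segment : String) (max_length : Int) (overlap : Int) : List String :=
  if max_length ≤ 0 then []
  else if overlap < 0 then []
  else if max_length ≤ overlap then []
  else if PySem.Str.len segment ≤ max_length then [PySem.Str.strip segment]
  else
    let positions := (PySem.List.pyRange 0 (PySem.Str.len segment - 1)).filter
      (fun i => ytBreaks.contains (PySem.Str.slice segment (some i) (some (i+2))))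
    ((PySem.List.pyRange 0 (PySem.Str.len segment) (max_length - overlap)).map
      (ytChunkAt segment max_length positions)).filter (fun c => c ≠ "")

-- ===== PRECONDITION & SPEC =====
-- Pre_ excludes exactly the inputs on which A raises YoutubeSegmentationError (its three guards).
def Pre_split_long_segment (segment : String) (max_length : Int) (overlap : Int) : Prop :=
  0 < max_length ∧ 0 ≤ overlap ∧ overlap < max_length
instance (segment : String) (max_length : Int) (overlap : Int) : Decidable (Pre_split_long_segment segment max_length overlap) := by unfold Pre_split_long_segment; infer_instance

def pvWitness_split_long_segment : String × Int × Int := ("one. two! three", 6, 2)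

def Spec_split_long_segment (segment : String) (max_length : Int) (overlap : Int) (out : List String) : Prop := out = split_long_segment_alt segment max_length overlap
instance (segment : String) (max_length : Int) (overlap : Int) (out : List String) : Decidable (Spec_split_long_segment segment max_length overlap out) := by unfold Spec_split_long_segment; infer_instance

-- ===== CLAIM (what is proved, stated in full; the proofs are below) =====
def Claim_equal_split_long_segment : Prop := ∀ (segment : String) (max_length : Int) (overlap : Int), Dom_split_long_segment segment max_length overlap → Pre_split_long_segment segment max_length overlap → Spec_split_long_segment segment max_length overlap (split_long_segment segment max_length overlap)

-- ===== LEMMAS AND PROOFS =====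

-- the six break patterns as char lists
def brkLists : List (List Char) := [['\n','\n'], ['.',' '], ['!',' '], ['?',' '], [';',' '], [':',' ']]

-- "r is Python-rfind-style greatest hit of P": -1 with no hit, or the greatest Nat satisfying P
def GreatestHit (P : Nat → Prop) (r : Int) : Prop :=
  (r = -1 ∧ ∀ i, ¬ P i) ∨ (∃ k : Nat, r = (k : Int) ∧ P k ∧ ∀ i, P i → i ≤ k)

theorem greatestHit_neg_one_le {P : Nat → Prop} {r : Int} (h : GreatestHit P r) : -1 ≤ r := by
  rcases h with ⟨h1, _⟩ | ⟨k, hk, _⟩ <;> omega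

theorem greatestHit_max {P Q : Nat → Prop} {r q : Int}
    (hP : GreatestHit P r) (hQ : GreatestHit Q q) :
    GreatestHit (fun i => P i ∨ Q i) (max r q) := by
  rcases hP with ⟨hr, hnP⟩ | ⟨k, hk, hPk, hmaxP⟩
  · rcases hQ with ⟨hq, hnQ⟩ | ⟨m, hm, hQm, hmaxQ⟩
    · exact Or.inl ⟨by omega, fun i h => h.elim (hnP i) (hnQ i)⟩
    · refine Or.inr ⟨m, by omega, Or.inr hQm, fun i h => ?_⟩
      exact h.elim (fun hp => absurd hp (hnP i)) (hmaxQ i)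
  · rcases hQ with ⟨hq, hnQ⟩ | ⟨m, hm, hQm, hmaxQ⟩
    · refine Or.inr ⟨k, by omega, Or.inl hPk, fun i h => ?_⟩
      exact h.elim (hmaxP i) (fun hq' => absurd hq' (hnQ i))
    · refine Or.inr ⟨max k m, by omega, ?_, fun i h => ?_⟩
      · rcases Nat.le_total k m with hkm | hkm
        · exact Or.inr (by simpa [Nat.max_eq_right hkm] using hQm)
        · exact Or.inl (by simpa [Nat.max_eq_left hkm] using hPk)
      · exact h.elim (fun hp => le_trans (hmaxP i hp) (Nat.le_max_left _ _))
          (fun hq' => le_trans (hmaxQ i hq') (Nat.le_max_right _ _))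

theorem greatestHit_congr {P Q : Nat → Prop} {r : Int}
    (h : GreatestHit P r) (hiff : ∀ i, P i ↔ Q i) : GreatestHit Q r := by
  rcases h with ⟨hr, hn⟩ | ⟨k, hk, hPk, hmax⟩
  · exact Or.inl ⟨hr, fun i hq => hn i ((hiff i).mpr hq)⟩
  · exact Or.inr ⟨k, hk, (hiff k).mp hPk, fun i hq => hmax i ((hiff i).mpr hq)⟩

-- characterization of Chars.rfind.go
theorem rfind_go_spec (s sub : List Char) (k : Nat) :
    GreatestHit (fun j => j ≤ k ∧ sub.isPrefixOf (s.drop j)) (PySem.Chars.rfind.go s sub k) := by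
  induction k with
  | zero =>
    by_cases h : sub.isPrefixOf (s.drop 0)
    · exact Or.inr ⟨0, by simp [PySem.Chars.rfind.go, List.isPrefixOf_iff_prefix.mp (by simpa using h : sub.isPrefixOf s = true)], ⟨le_rfl, h⟩, fun i hi => hi.1⟩
    · refine Or.inl ⟨by simp [PySem.Chars.rfind.go]; simpa using h, fun i hi => ?_⟩
      have : i = 0 := Nat.le_zero.mp hi.1
      exact h (this ▸ hi.2)
  | succ k ih =>
    by_cases h : sub.isPrefixOf (s.drop (k+1))
    · refine Or.inr ⟨k+1, by simp [PySem.Chars.rfind.go, List.isPrefixOf_iff_prefix.mp h], ⟨le_rfl, h⟩, fun i hi => hi.1⟩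
    · have hgo : PySem.Chars.rfind.go s sub (k+1) = PySem.Chars.rfind.go s sub k := by
        simp [PySem.Chars.rfind.go]
        intro h'; exact absurd (List.isPrefixOf_iff_prefix.mpr h') h
      rw [hgo]
      refine greatestHit_congr ih (fun i => ?_)
      constructor
      · exact fun hi => ⟨Nat.le_succ_of_le hi.1, hi.2⟩
      · rintro ⟨hle, hp⟩
        refine ⟨?_, hp⟩
        rcases Nat.lt_succ_iff_lt_or_eq.mp (Nat.lt_succ_of_le hle) with h1 | h1
        · omega
        · exact absurd (h1 ▸ hp) h

theorem rfindFrom_spec (s sub : List Char) (st en : Nat) (hsub : 0 < sub.length)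
    (hse : st ≤ en) (hen : en ≤ s.length) :
    GreatestHit (fun i => st ≤ i ∧ i + sub.length ≤ en ∧ sub.isPrefixOf (s.drop i))
      (PySem.Chars.rfindFrom s sub (st : Int) (some (en : Int))) := by
  have hlen_l : (List.drop st (List.take en s)).length = en - st := by
    simp [Nat.min_eq_left hen]
  have hform : PySem.Chars.rfindFrom s sub (st : Int) (some (en : Int)) =
      (if PySem.Chars.rfind (List.drop st (List.take en s)) sub = -1 then -1
       else (st : Int) + PySem.Chars.rfind (List.drop st (List.take en s)) sub) := by
    have c1 : ¬ ((s.length : Int) < (en : Int)) := by exact_mod_cast Nat.not_lt.mpr hen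
    have c2 : ¬ ((en : Int) < 0) := by omega
    have c3 : ¬ ((st : Int) < 0) := by omega
    have c4 : ¬ ((en : Int) < (st : Int)) := by exact_mod_cast Nat.not_lt.mpr hse
    simp [PySem.Chars.rfindFrom, c1, c2, c3, c4]
  -- bridge between positions in the window and positions in s
  have hbridge : ∀ j, sub.isPrefixOf ((List.drop st (List.take en s)).drop j) = true ↔
      (sub.isPrefixOf (s.drop (st + j)) = true ∧ st + j + sub.length ≤ en) := by
    intro j
    rw [List.drop_drop, List.drop_take]
    constructor
    · intro h
      have h' := List.prefix_take_iff.mp (List.isPrefixOf_iff_prefix.mp h)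
      have hl2 := h'.2
      exact ⟨List.isPrefixOf_iff_prefix.mpr h'.1, by omega⟩
    · rintro ⟨h1, h2⟩
      exact List.isPrefixOf_iff_prefix.mpr (List.prefix_take_iff.mpr
        ⟨List.isPrefixOf_iff_prefix.mp h1, by omega⟩)
  have hrfind : PySem.Chars.rfind (List.drop st (List.take en s)) sub =
      PySem.Chars.rfind.go (List.drop st (List.take en s)) sub
        (List.drop st (List.take en s)).length := rfl
  rw [hform, hrfind]
  rcases rfind_go_spec (List.drop st (List.take en s)) sub
      (List.drop st (List.take en s)).length with ⟨hr, hn⟩ | ⟨k, hk, hPk, hmax⟩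
  · rw [hr, if_pos rfl]
    refine Or.inl ⟨rfl, fun i hi => ?_⟩
    obtain ⟨h1, h2, h3⟩ := hi
    refine hn (i - st) ⟨by omega, ?_⟩
    rw [hbridge]
    constructor
    · have : st + (i - st) = i := by omega
      rw [this]; exact h3
    · omega
  · rw [hk, if_neg (by omega)]
    obtain ⟨hk1, hk2⟩ := hPk
    rw [hbridge] at hk2
    refine Or.inr ⟨st + k, by push_cast; ring, ⟨by omega, by omega, hk2.1⟩, fun i hi => ?_⟩
    obtain ⟨h1, h2, h3⟩ := hi
    have hP' : i - st ≤ (List.drop st (List.take en s)).length ∧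
        sub.isPrefixOf ((List.drop st (List.take en s)).drop (i - st)) = true := by
      refine ⟨by omega, ?_⟩
      rw [hbridge]
      constructor
      · have : st + (i - st) = i := by omega
        rw [this]; exact h3
      · omega
    have := hmax (i - st) hP'
    omega

-- B's positions list: membership and sortedness
theorem pyRange_pairwise_lt (b : Int) : (PySem.List.pyRange 0 b).Pairwise (· < ·) := by
  by_cases hb : b ≤ 0
  · have : PySem.List.pyRange 0 b = [] := by
      apply List.eq_nil_iff_forall_not_mem.mpr
      intro x hx
      have := PySem.List.mem_pyRange_one.mp hx
      omega
    simp [this]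
  · have hb : 0 < b := by omega
    obtain ⟨m, rfl⟩ : ∃ m : Nat, b = (m : Int) := ⟨b.toNat, by omega⟩
    rw [PySem.List.pyRange_zero_natCast]
    refine List.pairwise_map.mpr ?_
    exact List.pairwise_lt_range.imp (fun h => by exact_mod_cast h)

theorem positions_sorted (segment : String) :
    ((PySem.List.pyRange 0 (PySem.Str.len segment - 1)).filter
      (fun i => ytBreaks.contains (PySem.Str.slice segment (some i) (some (i+2))))).Pairwise (· ≤ ·) := by
  exact ((pyRange_pairwise_lt _).filter _).imp (fun h => le_of_lt h)

theorem test_iff (segment : String) (k : Nat) :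
    (ytBreaks.contains (PySem.Str.slice segment (some (k : Int)) (some ((k : Int) + 2))) = true) ↔
    ∃ p ∈ brkLists, p.isPrefixOf (segment.toList.drop k) = true := by
  have hcast : ((k : Int) + 2) = ((k + 2 : Nat) : Int) := by push_cast; ring
  have hslice : (PySem.Str.slice segment (some (k : Int)) (some ((k : Int) + 2))).toList
      = (segment.toList.drop k).take 2 := by
    rw [hcast, PySem.Str.toList_slice, PySem.Chars.slice_eq_listSlice, PySem.List.slice_natCast]
    simp
  rw [List.contains_iff_mem]
  constructor
  · intro h
    have key : ∀ (p : String), PySem.Str.slice segment (some (k : Int)) (some ((k : Int) + 2)) = p →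
        p.toList.isPrefixOf (segment.toList.drop k) = true := by
      intro p hp
      have h2 : (segment.toList.drop k).take 2 = p.toList := by rw [← hslice, hp]
      exact List.isPrefixOf_iff_prefix.mpr (h2 ▸ List.take_prefix 2 _)
    simp only [ytBreaks, List.mem_cons, List.not_mem_nil, or_false] at h
    rcases h with h | h | h | h | h | h <;>
      exact ⟨_, by decide, key _ h⟩
  · rintro ⟨p, hp, hpfx⟩
    have hpfx' := List.isPrefixOf_iff_prefix.mp hpfx
    have hplen : p.length = 2 := by
      simp only [brkLists, List.mem_cons, List.not_mem_nil, or_false] at hp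
      rcases hp with rfl | rfl | rfl | rfl | rfl | rfl <;> rfl
    have htake : (segment.toList.drop k).take 2 = p := by
      have := List.prefix_iff_eq_take.mp hpfx'
      rw [hplen] at this
      exact this.symm
    have hsl : (PySem.Str.slice segment (some (k : Int)) (some ((k : Int) + 2))).toList = p :=
      hslice.trans htake
    simp only [brkLists, List.mem_cons, List.not_mem_nil, or_false] at hp
    simp only [ytBreaks, List.mem_cons, List.not_mem_nil, or_false]
    rcases hp with rfl | rfl | rfl | rfl | rfl | rfl <;>
      [exact Or.inl (String.toList_inj.mp (by rw [hsl]; decide));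
       exact Or.inr (Or.inl (String.toList_inj.mp (by rw [hsl]; decide)));
       exact Or.inr (Or.inr (Or.inl (String.toList_inj.mp (by rw [hsl]; decide))));
       exact Or.inr (Or.inr (Or.inr (Or.inl (String.toList_inj.mp (by rw [hsl]; decide)))));
       exact Or.inr (Or.inr (Or.inr (Or.inr (Or.inl (String.toList_inj.mp (by rw [hsl]; decide))))));
       exact Or.inr (Or.inr (Or.inr (Or.inr (Or.inr (String.toList_inj.mp (by rw [hsl]; decide))))))]

theorem positions_mem (segment : String) (x : Int) :
    x ∈ (PySem.List.pyRange 0 (PySem.Str.len segment - 1)).filter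
      (fun i => ytBreaks.contains (PySem.Str.slice segment (some i) (some (i+2)))) ↔
    ∃ k : Nat, x = (k : Int) ∧ k + 2 ≤ segment.toList.length ∧
      ∃ p ∈ brkLists, p.isPrefixOf (segment.toList.drop k) := by
  rw [List.mem_filter, PySem.List.mem_pyRange_one, PySem.Str.len_eq]
  constructor
  · rintro ⟨⟨hx0, hxlt⟩, hpred⟩
    obtain ⟨k, rfl⟩ : ∃ k : Nat, x = (k : Int) := ⟨x.toNat, by omega⟩
    refine ⟨k, rfl, by omega, (test_iff segment k).mp hpred⟩
  · rintro ⟨k, rfl, hk2, hp⟩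
    refine ⟨⟨by omega, by omega⟩, (test_iff segment k).mpr hp⟩

-- B's bisect lookup is the greatest break position ≤ en - 2
theorem lookup_spec (segment : String) (en : Nat) (hen : en < segment.toList.length) :
    GreatestHit (fun i => i + 2 ≤ en ∧ ∃ p ∈ brkLists, p.isPrefixOf (segment.toList.drop i))
      (let positions := (PySem.List.pyRange 0 (PySem.Str.len segment - 1)).filter
        (fun i => ytBreaks.contains (PySem.Str.slice segment (some i) (some (i+2))));
       let j := PySem.List.bisectRight positions ((en : Int) - 2);
       if j ≠ 0 then positions.getD (j-1) (-1) else (-1 : Int)) := by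
  have hsort := positions_sorted segment
  have hspec := PySem.List.bisectRight_spec
    ((PySem.List.pyRange 0 (PySem.Str.len segment - 1)).filter
      (fun i => ytBreaks.contains (PySem.Str.slice segment (some i) (some (i+2)))))
    ((en : Int) - 2) hsort
  obtain ⟨hj_le, hlo, hhi⟩ := hspec
  set positions := (PySem.List.pyRange 0 (PySem.Str.len segment - 1)).filter
      (fun i => ytBreaks.contains (PySem.Str.slice segment (some i) (some (i+2)))) with hposdef
  set j := PySem.List.bisectRight positions ((en : Int) - 2) with hjdef
  show GreatestHit _ (if j ≠ 0 then positions.getD (j-1) (-1) else (-1 : Int))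
  by_cases hj0 : j = 0
  · rw [if_neg (by simp [hj0])]
    refine Or.inl ⟨rfl, ?_⟩
    rintro i ⟨hi2, hp⟩
    have hmem : (i : Int) ∈ positions := (positions_mem segment i).mpr ⟨i, rfl, by omega, hp⟩
    obtain ⟨idx, hidx, hgi⟩ := List.mem_iff_getElem.mp hmem
    have := hhi idx hidx (by omega)
    rw [hgi] at this
    omega
  · rw [if_pos hj0]
    have hj1 : j - 1 < positions.length := by omega
    have hgd : positions.getD (j-1) (-1) = positions[j-1] := by
      rw [List.getD_eq_getElem?_getD, List.getElem?_eq_getElem hj1]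
      rfl
    rw [hgd]
    have hmem : positions[j-1] ∈ positions := List.getElem_mem hj1
    obtain ⟨k, hkx, hk2, hkp⟩ := (positions_mem segment _).mp hmem
    have hle : positions[j-1] ≤ (en : Int) - 2 := hlo (j-1) hj1 (by omega)
    refine Or.inr ⟨k, hkx, ⟨by rw [hkx] at hle; omega, hkp⟩, ?_⟩
    rintro i ⟨hi2, hp⟩
    have hmemi : (i : Int) ∈ positions := (positions_mem segment i).mpr ⟨i, rfl, by omega, hp⟩
    obtain ⟨idx, hidx, hgi⟩ := List.mem_iff_getElem.mp hmemi
    have hidxlt : idx < j := by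
      by_contra hge
      have := hhi idx hidx (by omega)
      rw [hgi] at this
      omega
    have hmono : positions[idx] ≤ positions[j-1] := by
      rcases Nat.lt_or_ge idx (j-1) with h | h
      · exact (List.pairwise_iff_getElem.mp hsort) idx (j-1) hidx hj1 h
      · have : idx = j - 1 := by omega
        simp [this]
    rw [hgi, hkx] at hmono
    exact_mod_cast hmono

-- A's six-way max is the greatest break position in [st, en-2]
theorem sixmax_spec (segment : String) (st en : Nat) (hse : st ≤ en) (hen : en ≤ segment.toList.length) :
    GreatestHit (fun i => st ≤ i ∧ i + 2 ≤ en ∧ ∃ p ∈ brkLists, p.isPrefixOf (segment.toList.drop i))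
      (max (max (max (max (max
        (PySem.Str.rfindFrom segment "\n\n" (st : Int) (some (en : Int)))
        (PySem.Str.rfindFrom segment ". " (st : Int) (some (en : Int))))
        (PySem.Str.rfindFrom segment "! " (st : Int) (some (en : Int))))
        (PySem.Str.rfindFrom segment "? " (st : Int) (some (en : Int))))
        (PySem.Str.rfindFrom segment "; " (st : Int) (some (en : Int))))
        (PySem.Str.rfindFrom segment ": " (st : Int) (some (en : Int)))) := by
  have t1 : "\n\n".toList = ['\n','\n'] := by decide
  have t2 : ". ".toList = ['.',' '] := by decide
  have t3 : "! ".toList = ['!',' '] := by decide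
  have t4 : "? ".toList = ['?',' '] := by decide
  have t5 : "; ".toList = [';',' '] := by decide
  have t6 : ": ".toList = [':',' '] := by decide
  rw [PySem.Str.rfindFrom_eq, PySem.Str.rfindFrom_eq, PySem.Str.rfindFrom_eq,
      PySem.Str.rfindFrom_eq, PySem.Str.rfindFrom_eq, PySem.Str.rfindFrom_eq,
      t1, t2, t3, t4, t5, t6]
  have h1 := rfindFrom_spec segment.toList ['\n','\n'] st en (by decide) hse hen
  have h2 := rfindFrom_spec segment.toList ['.',' '] st en (by decide) hse hen
  have h3 := rfindFrom_spec segment.toList ['!',' '] st en (by decide) hse hen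
  have h4 := rfindFrom_spec segment.toList ['?',' '] st en (by decide) hse hen
  have h5 := rfindFrom_spec segment.toList [';',' '] st en (by decide) hse hen
  have h6 := rfindFrom_spec segment.toList [':',' '] st en (by decide) hse hen
  refine greatestHit_congr
    (greatestHit_max (greatestHit_max (greatestHit_max (greatestHit_max
      (greatestHit_max h1 h2) h3) h4) h5) h6) (fun i => ?_)
  simp only [List.length_cons, List.length_nil, brkLists, List.mem_cons,
    List.not_mem_nil, or_false, exists_eq_or_imp, exists_eq_left]
  constructor
  · rintro (((((⟨a,b,c⟩|⟨a,b,c⟩)|⟨a,b,c⟩)|⟨a,b,c⟩)|⟨a,b,c⟩)|⟨a,b,c⟩) <;>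
      exact ⟨a, b, by tauto⟩
  · rintro ⟨a, b, (c|c|c|c|c|c)⟩
    · exact Or.inl (Or.inl (Or.inl (Or.inl (Or.inl ⟨a, b, c⟩))))
    · exact Or.inl (Or.inl (Or.inl (Or.inl (Or.inr ⟨a, b, c⟩))))
    · exact Or.inl (Or.inl (Or.inl (Or.inr ⟨a, b, c⟩)))
    · exact Or.inl (Or.inl (Or.inr ⟨a, b, c⟩))
    · exact Or.inl (Or.inr ⟨a, b, c⟩)
    · exact Or.inr ⟨a, b, c⟩

-- the threshold comparison turns the two greatest-hit values into the same chunk end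
theorem greatest_if_eq {Q : Nat → Prop} {st : Nat} {lbA lbB thr end0 : Int}
    (hA : GreatestHit (fun i => st ≤ i ∧ Q i) lbA) (hB : GreatestHit Q lbB)
    (hthr : (st : Int) ≤ thr) :
    (if lbA > thr then lbA + 1 else end0) = (if lbB > thr then lbB + 1 else end0) := by
  have hAleB : lbA ≤ lbB := by
    rcases hA with ⟨h1, _⟩ | ⟨k, hk, ⟨_, hQk⟩, _⟩
    · have := greatestHit_neg_one_le hB
      omega
    · rcases hB with ⟨h2, hn⟩ | ⟨m, hm, _, hmax⟩
      · exact absurd hQk (hn k)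
      · have := hmax k hQk
        omega
  by_cases hcond : lbB > thr
  · rcases hB with ⟨h2, _⟩ | ⟨m, hm, hQm, _⟩
    · omega
    · have hstm : st ≤ m := by
        have : (st : Int) ≤ (m : Int) := by omega
        exact_mod_cast this
      have hBleA : lbB ≤ lbA := by
        rcases hA with ⟨h1, hn⟩ | ⟨k, hk, _, hmax⟩
        · exact absurd ⟨hstm, hQm⟩ (hn m)
        · have := hmax m ⟨hstm, hQm⟩
          omega
      have : lbA = lbB := le_antisymm hAleB hBleA
      rw [this]
  · rw [if_neg hcond, if_neg (by omega)]

-- A's per-chunk computation extracted as a function (proof helper only)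
def pvChunkA (segment : String) (max_length : Int) (start : Int) : String :=
  let n : Int := PySem.Str.len segment
  let end0 := min (start + max_length) n
  let end_ := if end0 < n then
      let last_break := max (max (max (max (max
        (PySem.Str.rfindFrom segment "\n\n" start (some end0))
        (PySem.Str.rfindFrom segment ". " start (some end0)))
        (PySem.Str.rfindFrom segment "! " start (some end0)))
        (PySem.Str.rfindFrom segment "? " start (some end0)))
        (PySem.Str.rfindFrom segment "; " start (some end0)))
        (PySem.Str.rfindFrom segment ": " start (some end0))
      if last_break > start + PySem.Int.floordiv max_length 2 then last_break + 1 else end0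
    else end0
  PySem.Str.strip (PySem.Str.slice segment (some start) (some end_))

-- A's chunk equals B's chunk at every admissible start
theorem chunk_eq (segment : String) (max_length : Int) (hml : 0 < max_length)
    (start : Int) (hs : 0 ≤ start) (hlt : start < PySem.Str.len segment) :
    pvChunkA segment max_length start =
    ytChunkAt segment max_length
      ((PySem.List.pyRange 0 (PySem.Str.len segment - 1)).filter
        (fun i => ytBreaks.contains (PySem.Str.slice segment (some i) (some (i+2)))))
      start := by
  unfold pvChunkA ytChunkAt
  simp only []
  by_cases hend : min (start + max_length) (PySem.Str.len segment) < PySem.Str.len segment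
  · rw [if_pos hend, if_pos hend]
    congr 2
    obtain ⟨st, rfl⟩ : ∃ st : Nat, start = (st : Int) := ⟨start.toNat, by omega⟩
    have hnn : PySem.Str.len segment = (segment.toList.length : Int) := PySem.Str.len_eq segment
    obtain ⟨en, hen_eq⟩ : ∃ en : Nat,
        min ((st : Int) + max_length) (PySem.Str.len segment) = (en : Int) := by
      refine ⟨(min ((st : Int) + max_length) (PySem.Str.len segment)).toNat, ?_⟩
      rw [hnn]
      omega
    have hse : st ≤ en := by
      rw [hnn] at hen_eq hlt
      omega
    have hlt2 : en < segment.toList.length := by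
      rw [hen_eq, hnn] at hend
      exact_mod_cast hend
    have hthr : (st : Int) ≤ (st : Int) + PySem.Int.floordiv max_length 2 := by
      have h2 : PySem.Int.floordiv max_length 2 = max_length / 2 :=
        PySem.Int.floordiv_eq_ediv_of_pos (by omega)
      have := Int.ediv_nonneg (le_of_lt hml) (by omega : (0:Int) ≤ 2)
      omega
    rw [hen_eq]
    exact congrArg some (greatest_if_eq (sixmax_spec segment st en hse (le_of_lt hlt2))
      (lookup_spec segment en hlt2) hthr)
  · rw [if_neg hend, if_neg hend]

-- a positive-step pyRange unfolds one element at a time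
theorem pyRange_pos_nil (a b s : Int) (hs : 0 < s) (hab : b ≤ a) :
    PySem.List.pyRange a b s = [] := by
  rw [PySem.List.pyRange_of_pos a b hs, if_neg (by omega)]
  simp

theorem pyRange_pos_cons (a b s : Int) (hs : 0 < s) (hab : a < b) :
    PySem.List.pyRange a b s = a :: PySem.List.pyRange (a + s) b s := by
  rw [PySem.List.pyRange_of_pos a b hs, PySem.List.pyRange_of_pos (a + s) b hs]
  have key : (b - a + s - 1) / s = (b - a - 1) / s + 1 := by
    have h : b - a + s - 1 = (b - a - 1) + 1 * s := by ring
    rw [h, Int.add_mul_ediv_right _ _ (by omega)]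
  have hq0 : 0 ≤ (b - a - 1) / s := Int.ediv_nonneg (by omega) (by omega)
  have hN : ((b - a + s - 1) / s).toNat = ((b - a - 1) / s).toNat + 1 := by omega
  rw [if_pos hab, hN, List.range_succ_eq_map]
  by_cases h2 : a + s < b
  · have hnum : b - (a + s) + s - 1 = b - a - 1 := by ring
    rw [if_pos h2, hnum]
    simp only [List.map_cons, List.map_map, Nat.cast_zero, mul_zero, add_zero]
    refine congrArg _ ?_
    refine List.map_congr_left (fun k _ => ?_)
    simp only [Function.comp, Nat.succ_eq_add_one]
    push_cast
    ring
  · have hz : (b - a - 1) / s = 0 :=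
      Int.ediv_eq_zero_of_lt (by omega) (by omega)
    rw [if_neg h2, hz]
    simp

-- A's accumulator loop is the map-then-filter pipeline over the range of starts
theorem loopA_eq_pipeline (segment : String) (max_length overlap : Int)
    (hstep : 0 < max_length - overlap) :
    ∀ (fuel : Nat) (start : Int) (chunks : List String),
      PySem.Str.len segment ≤ start + (max_length - overlap) * (fuel : Int) →
      splitLoopA segment max_length overlap fuel start chunks =
      chunks ++ ((PySem.List.pyRange start (PySem.Str.len segment)
          (max_length - overlap)).map (pvChunkA segment max_length)).filter
        (fun c => c ≠ "") := by
  intro fuel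
  induction fuel with
  | zero =>
    intro start chunks hb
    simp only [Nat.cast_zero, mul_zero, add_zero] at hb
    rw [splitLoopA, pyRange_pos_nil _ _ _ hstep hb]
    simp
  | succ fuel ih =>
    intro start chunks hb
    rw [splitLoopA]
    simp only []
    by_cases hlt : start < PySem.Str.len segment
    · rw [if_pos hlt, pyRange_pos_cons _ _ _ hstep hlt]
      have hb' : PySem.Str.len segment ≤
          (start + (max_length - overlap)) + (max_length - overlap) * (fuel : Int) := by
        have : (max_length - overlap) * ((fuel : Int) + 1)
            = (max_length - overlap) * (fuel : Int) + (max_length - overlap) := by ring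
        push_cast at hb
        omega
      rw [ih (start + (max_length - overlap)) _ hb']
      have hchunk : (PySem.Str.strip (PySem.Str.slice segment (some start)
          (some (if min (start + max_length) (PySem.Str.len segment) < PySem.Str.len segment then
            (let last_break := max (max (max (max (max
              (PySem.Str.rfindFrom segment "\n\n" start (some (min (start + max_length) (PySem.Str.len segment))))
              (PySem.Str.rfindFrom segment ". " start (some (min (start + max_length) (PySem.Str.len segment)))))
              (PySem.Str.rfindFrom segment "! " start (some (min (start + max_length) (PySem.Str.len segment)))))
              (PySem.Str.rfindFrom segment "? " start (some (min (start + max_length) (PySem.Str.len segment)))))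
              (PySem.Str.rfindFrom segment "; " start (some (min (start + max_length) (PySem.Str.len segment)))))
              (PySem.Str.rfindFrom segment ": " start (some (min (start + max_length) (PySem.Str.len segment))))
            if last_break > start + PySem.Int.floordiv max_length 2 then last_break + 1
            else min (start + max_length) (PySem.Str.len segment))
          else min (start + max_length) (PySem.Str.len segment))))) = pvChunkA segment max_length start := rfl
      rw [hchunk]
      simp only [List.map_cons, List.filter_cons]
      by_cases hne : pvChunkA segment max_length start ≠ ""
      · rw [if_pos hne, if_pos (by simpa using hne)]
        simp
      · rw [if_neg hne, if_neg (by simpa using hne)]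
    · rw [if_neg hlt, pyRange_pos_nil _ _ _ hstep (by omega)]
      simp

-- ===== VERDICT (by name: the statement is the Claim_ definition above) =====
theorem split_long_segment_spec : Claim_equal_split_long_segment := by
  intro segment max_length overlap _hdom hpre
  obtain ⟨hml, hov, hlt⟩ := hpre
  unfold Spec_split_long_segment split_long_segment split_long_segment_alt
  have g1 : ¬ max_length ≤ 0 := by omega
  have g2 : ¬ overlap < 0 := by omega
  have g3 : ¬ max_length ≤ overlap := by omega
  rw [if_neg g1, if_neg g2, if_neg g3, if_neg g1, if_neg g2, if_neg g3]
  by_cases h : PySem.Str.len segment ≤ max_length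
  · rw [if_pos h, if_pos h]
  · rw [if_neg h, if_neg h]
    have hstep : 0 < max_length - overlap := by omega
    have hnn : PySem.Str.len segment = (segment.toList.length : Int) := PySem.Str.len_eq segment
    have hfuel : PySem.Str.len segment ≤
        0 + (max_length - overlap) * (segment.toList.length : Int) := by
      rw [hnn]
      nlinarith [Int.natCast_nonneg segment.toList.length]
    rw [loopA_eq_pipeline segment max_length overlap hstep segment.toList.length 0 [] hfuel]
    simp only [List.nil_append]
    refine congrArg (List.filter _) (List.map_congr_left (fun x hx => ?_))
    obtain ⟨hx0, hxn, _⟩ := (PySem.List.mem_pyRange_iff_of_pos hstep x).mp hx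
    exact chunk_eq segment max_length hml x hx0 hxn
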